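-- pv_equiv track=rewrite | github.com/ubonpartners/stuff | stuff/inference/postprocess.py | build_class_mapping
-- ===== SOURCE A (Python) =====
-- CLASS_SYNONYMS = {
--     "person": ["man", "woman", "boy", "girl"],
--     "vehicle": ["car", "bicycle", "motorcycle", "train", "truck", "bus", "airplane", "boat"],
--     "animal": ["cat", "dog", "horse", "sheep", "cow", "bird", "elephant", "bear", "zebra", "giraffe"],
--     "weapon": ["gun", "dagger", "pistol", "handgun", "rifle", "revolver"],
--     "face": [],
-- }
--
-- def build_class_mapping(infer_model_class_names, class_names, class_synonyms=None):
--     if class_synonyms is None: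
--         class_synonyms = CLASS_SYNONYMS
--
--     if class_names is None:
--         class_names = list(infer_model_class_names)
--
--     det_class_remap = [-1] * len(infer_model_class_names)
--     can_detect = [False] * len(class_names)
--
--     for i, source_name in enumerate(infer_model_class_names):
--         if source_name in class_names:
--             dst_idx = class_names.index(source_name)
--             det_class_remap[i] = dst_idx
--             can_detect[dst_idx] = True
--             continue
--         for target_name, synonyms in class_synonyms.items():
--             if target_name in class_names and source_name in synonyms:
--                 dst_idx = class_names.index(target_name)
--                 det_class_remap[i] = dst_idx
--                 can_detect[dst_idx] = True
--                 break
--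
--     return class_names, det_class_remap, can_detect
-- ===== SOURCE B (Python) =====
-- CLASS_SYNONYMS = {
--     "person": ["man", "woman", "boy", "girl"],
--     "vehicle": ["car", "bicycle", "motorcycle", "train", "truck", "bus", "airplane", "boat"],
--     "animal": ["cat", "dog", "horse", "sheep", "cow", "bird", "elephant", "bear", "zebra", "giraffe"],
--     "weapon": ["gun", "dagger", "pistol", "handgun", "rifle", "revolver"],
--     "face": [],
-- }
--
-- def build_class_mapping(infer_model_class_names, class_names, class_synonyms=None):
--     if class_synonyms is None:
--         class_synonyms = CLASS_SYNONYMS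
--     if class_names is None:
--         class_names = list(infer_model_class_names)
--
--     # index of the FIRST occurrence of each target name
--     name_to_idx = {}
--     for i, n in enumerate(class_names):
--         name_to_idx.setdefault(n, i)
--
--     # synonym -> target index, first matching target (in class_synonyms order) wins
--     syn_to_idx = {}
--     for target, synonyms in class_synonyms.items():
--         ti = name_to_idx.get(target)
--         if ti is not None:
--             for s in synonyms:
--                 syn_to_idx.setdefault(s, ti)
--
--     det_class_remap = [name_to_idx.get(n, syn_to_idx.get(n, -1)) for n in infer_model_class_names]
--
--     can_detect = [False] * len(class_names)
--     for d in det_class_remap: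
--         if d >= 0:
--             can_detect[d] = True
--
--     return class_names, det_class_remap, can_detect
-- ===== Notes on version B (the rewrite author's own statement) =====
-- stated objective: faster
-- what changed: Replaces A's per-name list scans ('in'/.index over class_names and a full synonym-table scan per unmatched name) with a name->index dict and a reverse synonym->index dict built once, then a single lookup pass.
import Mathlib
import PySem

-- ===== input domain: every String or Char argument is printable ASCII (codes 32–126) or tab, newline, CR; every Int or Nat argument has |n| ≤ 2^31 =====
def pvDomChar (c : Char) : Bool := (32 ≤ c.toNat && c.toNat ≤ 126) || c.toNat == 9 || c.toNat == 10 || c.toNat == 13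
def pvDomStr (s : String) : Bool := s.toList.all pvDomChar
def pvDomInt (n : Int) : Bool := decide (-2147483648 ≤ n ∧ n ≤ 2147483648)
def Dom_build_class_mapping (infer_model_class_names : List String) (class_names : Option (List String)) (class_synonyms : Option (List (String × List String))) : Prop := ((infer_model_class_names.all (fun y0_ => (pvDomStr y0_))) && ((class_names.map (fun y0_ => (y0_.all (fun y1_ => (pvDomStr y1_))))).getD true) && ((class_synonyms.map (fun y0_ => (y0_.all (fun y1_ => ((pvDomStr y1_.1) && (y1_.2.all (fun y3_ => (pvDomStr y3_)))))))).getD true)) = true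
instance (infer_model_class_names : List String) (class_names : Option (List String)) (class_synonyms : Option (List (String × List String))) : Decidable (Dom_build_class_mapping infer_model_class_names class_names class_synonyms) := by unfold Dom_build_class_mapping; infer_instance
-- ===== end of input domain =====

-- B replaces A's repeated list scans (`in` / `.index` over class_names, and the full
-- synonym-table scan per unmatched name) by two dicts built once (name→index, synonym→index)
-- and a single lookup pass; objective: faster (asymptotic). Return values are identical.

-- ===== PORT A =====
def CLASS_SYNONYMS : List (String × List String) :=
  [("person", ["man", "woman", "boy", "girl"]),
   ("vehicle", ["car", "bicycle", "motorcycle", "train", "truck", "bus", "airplane", "boat"]),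
   ("animal", ["cat", "dog", "horse", "sheep", "cow", "bird", "elephant", "bear", "zebra", "giraffe"]),
   ("weapon", ["gun", "dagger", "pistol", "handgun", "rifle", "revolver"]),
   ("face", [])]

-- inner `for target_name, synonyms in class_synonyms.items(): … break`:
-- first (target, synonyms) with target ∈ class_names and source ∈ synonyms; returns class_names.index(target)
def bcmA_syn (class_names : List String) (source : String) : List (String × List String) → Option Nat
  | [] => none
  | (target, synonyms) :: rest =>
    if class_names.contains target && synonyms.contains source then
      PySem.List.index? class_names target
    else bcmA_syn class_names source rest

-- `for i, source_name in enumerate(infer_model_class_names): …` mutating det/can by index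
def bcmA_loop (class_names : List String) (syn : List (String × List String)) :
    List String → Nat → List Int → List Bool → List Int × List Bool
  | [], _, det, can => (det, can)
  | source :: rest, i, det, can =>
    if class_names.contains source then
      -- class_names.index(source): guarded by the membership test, so index? is some; getD 0 never defaults
      let dst := (PySem.List.index? class_names source).getD 0
      bcmA_loop class_names syn rest (i + 1) (det.set i (dst : Int)) (can.set dst true)
    else
      match bcmA_syn class_names source syn with
      | some dst => bcmA_loop class_names syn rest (i + 1) (det.set i (dst : Int)) (can.set dst true)
      | none => bcmA_loop class_names syn rest (i + 1) det can

def build_class_mapping (infer_model_class_names : List String) (class_names : Option (List String)) (class_synonyms : Option (List (String × List String))) : List String × List Int × List Bool :=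
  let syn := class_synonyms.getD CLASS_SYNONYMS
  let cn := class_names.getD infer_model_class_names
  let r := bcmA_loop cn syn infer_model_class_names 0
             (List.replicate infer_model_class_names.length (-1))
             (List.replicate cn.length false)
  (cn, r.1, r.2)

-- ===== PORT B =====
-- name_to_idx: first index of each name in class_names (setdefault keeps the first)
def bcmB_nameIdx (class_names : List String) : PySem.Dict String Int :=
  (PySem.List.enumerate class_names 0).foldl (fun d p => d.setdefault p.2 p.1) PySem.Dict.empty

-- syn_to_idx: synonym → index of its first target that occurs in class_names
def bcmB_synIdx (nameIdx : PySem.Dict String Int) (class_synonyms : List (String × List String)) : PySem.Dict String Int :=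
  class_synonyms.foldl
    (fun d p =>
      match nameIdx.get? p.1 with
      | some ti => p.2.foldl (fun d s => d.setdefault s ti) d
      | none => d)
    PySem.Dict.empty

def bcmB_entry (nameIdx synIdx : PySem.Dict String Int) (n : String) : Int :=
  (nameIdx.get? n).getD ((synIdx.get? n).getD (-1))

def build_class_mapping_alt (infer_model_class_names : List String) (class_names : Option (List String)) (class_synonyms : Option (List (String × List String))) : List String × List Int × List Bool :=
  let syn := class_synonyms.getD CLASS_SYNONYMS
  let cn := class_names.getD infer_model_class_names
  let nameIdx := bcmB_nameIdx cn
  let synIdx := bcmB_synIdx nameIdx syn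
  let det := infer_model_class_names.map (bcmB_entry nameIdx synIdx)
  let can := det.foldl (fun can d => if 0 ≤ d then can.set d.toNat true else can)
               (List.replicate cn.length false)
  (cn, det, can)

-- ===== PRECONDITION & SPEC =====
def Spec_build_class_mapping (infer_model_class_names : List String) (class_names : Option (List String)) (class_synonyms : Option (List (String × List String))) (out : List String × List Int × List Bool) : Prop := out = build_class_mapping_alt infer_model_class_names class_names class_synonyms
instance (infer_model_class_names : List String) (class_names : Option (List String)) (class_synonyms : Option (List (String × List String))) (out : List String × List Int × List Bool) : Decidable (Spec_build_class_mapping infer_model_class_names class_names class_synonyms out) := by unfold Spec_build_class_mapping; infer_instance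

-- ===== CLAIM (what is proved, stated in full; the proofs are below) =====
def Claim_equal_build_class_mapping : Prop := ∀ (infer_model_class_names : List String) (class_names : Option (List String)) (class_synonyms : Option (List (String × List String))), Dom_build_class_mapping infer_model_class_names class_names class_synonyms → Spec_build_class_mapping infer_model_class_names class_names class_synonyms (build_class_mapping infer_model_class_names class_names class_synonyms)

-- ===== LEMMAS AND PROOFS =====

-- name_to_idx lookup = first index in class_names (generalized over the accumulator / start)
theorem bcmB_nameIdx_fold_get (cn : List String) (n : String) :
    ∀ (s : Int) (d : PySem.Dict String Int),
      ((PySem.List.enumerate cn s).foldl (fun d p => d.setdefault p.2 p.1) d).get? n =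
        match d.get? n with
        | some v => some v
        | none => (PySem.List.index? cn n).map (fun k => s + (k : Int)) := by
  induction cn with
  | nil =>
    intro s d
    rw [PySem.List.enumerate_nil]
    cases hd : d.get? n <;> simp [hd, PySem.List.index?]
  | cons x xs ih =>
    intro s d
    rw [PySem.List.enumerate_cons]
    simp only [List.foldl_cons]
    rw [ih (s + 1) (d.setdefault x s)]
    by_cases hx : n = x
    · subst hx
      rw [PySem.Dict.get?_setdefault_self, PySem.List.index?_cons_self]
      cases hd : d.get? n <;> simp [hd]
    · have hne : x ≠ n := fun h => hx h.symm
      have hget : (d.setdefault x s).get? n = d.get? n := by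
        cases hc : d.contains x with
        | true => rw [PySem.Dict.setdefault_of_contains _ _ hc]
        | false =>
          rw [PySem.Dict.setdefault_of_not_contains _ _ hc,
              PySem.Dict.get?_insert_of_ne _ _ hx]
      rw [hget, PySem.List.index?_cons_of_ne _ hne]
      cases hd : d.get? n with
      | some v => simp [hd]
      | none =>
        cases hi : PySem.List.index? xs n with
        | none => simp [hd, hi]
        | some k => simp [hd, hi]; omega

theorem bcmB_nameIdx_get (cn : List String) (n : String) :
    (bcmB_nameIdx cn).get? n = (PySem.List.index? cn n).map (fun k => (k : Int)) := by
  rw [bcmB_nameIdx, bcmB_nameIdx_fold_get cn n 0 PySem.Dict.empty]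
  simp [PySem.Dict.get?_empty]

-- setdefault of the same value over a list of keys: lookup = old value, else membership
theorem setdefault_list_get (ti : Int) (n : String) :
    ∀ (syns : List String) (d : PySem.Dict String Int),
      ((syns.foldl (fun d s => d.setdefault s ti) d).get? n) =
        match d.get? n with
        | some v => some v
        | none => if syns.contains n then some ti else none := by
  intro syns
  induction syns with
  | nil => intro d; cases hd : d.get? n <;> simp [hd]
  | cons s rest ih =>
    intro d
    simp only [List.foldl_cons]
    rw [ih (d.setdefault s ti)]
    by_cases hs : n = s
    · subst hs
      rw [PySem.Dict.get?_setdefault_self]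
      cases hd : d.get? n with
      | some v => simp [hd]
      | none => simp [hd]
    · have hget : (d.setdefault s ti).get? n = d.get? n := by
        cases hc : d.contains s with
        | true => rw [PySem.Dict.setdefault_of_contains _ _ hc]
        | false =>
          rw [PySem.Dict.setdefault_of_not_contains _ _ hc,
              PySem.Dict.get?_insert_of_ne _ _ hs]
      rw [hget]
      cases hd : d.get? n with
      | some v => simp
      | none =>
        have hsymm : s ≠ n := fun h => hs h.symm
        simp [List.contains_cons, hsymm, hs]

-- syn_to_idx lookup = A's inner synonym scan (generalized over the accumulator)
theorem bcmB_synIdx_fold_get (cn : List String) (n : String) :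
    ∀ (syn : List (String × List String)) (d : PySem.Dict String Int),
      ((syn.foldl
          (fun d p =>
            match (bcmB_nameIdx cn).get? p.1 with
            | some ti => p.2.foldl (fun d s => d.setdefault s ti) d
            | none => d)
          d).get? n) =
        match d.get? n with
        | some v => some v
        | none => (bcmA_syn cn n syn).map (fun k => (k : Int)) := by
  intro syn
  induction syn with
  | nil => intro d; cases hd : d.get? n <;> simp [bcmA_syn, hd]
  | cons p rest ih =>
    intro d
    obtain ⟨t, syns⟩ := p
    simp only [List.foldl_cons]
    cases hi : PySem.List.index? cn t with
    | none =>
      have hmem : t ∉ cn := (PySem.List.index?_eq_none_iff cn t).mp hi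
      have hc : cn.contains t = false := by simpa using hmem
      have hget : (bcmB_nameIdx cn).get? t = none := by rw [bcmB_nameIdx_get, hi]; rfl
      rw [hget]
      rw [ih d]
      simp [bcmA_syn, hmem]
    | some k =>
      have hmem : t ∈ cn := by
        have := (PySem.List.index?_isSome_iff cn t).mp (by rw [hi]; rfl)
        exact this
      have hc : cn.contains t = true := by simpa using hmem
      have hget : (bcmB_nameIdx cn).get? t = some (k : Int) := by rw [bcmB_nameIdx_get, hi]; rfl
      rw [hget]
      rw [ih _]
      rw [setdefault_list_get]
      have hi' : List.idxOf? t cn = some k := by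
        rw [← PySem.List.index?_eq_idxOf?]; exact hi
      cases hd : d.get? n with
      | some v => simp
      | none =>
        by_cases hsn : n ∈ syns
        · simp [bcmA_syn, hmem, hsn, hi']
        · simp [bcmA_syn, hmem, hsn]

theorem bcmB_synIdx_get (cn : List String) (syn : List (String × List String)) (n : String) :
    (bcmB_synIdx (bcmB_nameIdx cn) syn).get? n = (bcmA_syn cn n syn).map (fun k => (k : Int)) := by
  rw [bcmB_synIdx, bcmB_synIdx_fold_get cn n syn PySem.Dict.empty]
  simp [PySem.Dict.get?_empty]

-- A's loop = (prefix kept ++ per-element map, fold of can-updates), by induction over the names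
theorem bcmA_loop_eq (cn : List String) (syn : List (String × List String)) :
    ∀ (xs : List String) (i : Nat) (det : List Int) (can : List Bool),
      det.drop i = List.replicate xs.length (-1) →
      bcmA_loop cn syn xs i det can =
        (det.take i ++ xs.map (bcmB_entry (bcmB_nameIdx cn) (bcmB_synIdx (bcmB_nameIdx cn) syn)),
         xs.foldl (fun can s =>
            let d := bcmB_entry (bcmB_nameIdx cn) (bcmB_synIdx (bcmB_nameIdx cn) syn) s
            if 0 ≤ d then can.set d.toNat true else can) can) := by
  intro xs
  induction xs with
  | nil =>
    intro i det can hdrop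
    simp only [List.length_nil, List.replicate_zero] at hdrop
    rw [bcmA_loop]
    simp [List.take_of_length_le (List.drop_eq_nil_iff.mp hdrop)]
  | cons s rest ih =>
    intro i det can hdrop
    have hlen : det.length = i + (rest.length + 1) := by
      have h := congrArg List.length hdrop
      simp only [List.length_drop, List.length_replicate, List.length_cons] at h
      omega
    have hilt : i < det.length := by omega
    have hdet_i : det[i] = -1 := by
      have h := congrArg (fun l => l[0]?) hdrop
      simp only [List.getElem?_drop, Nat.add_zero] at h
      rw [List.getElem?_eq_getElem hilt] at h
      simp at h
      exact h
    have hdrop' : det.drop (i + 1) = List.replicate rest.length (-1) := by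
      have h : det.drop (i + 1) = (det.drop i).drop 1 := by
        rw [List.drop_drop, Nat.add_comm]
      rw [h, hdrop, List.drop_replicate]
      norm_num
    have hset : ∀ (v : Int), (det.set i v).drop (i + 1) = List.replicate rest.length (-1) := by
      intro v
      rw [List.drop_set_of_lt (by omega)]
      exact hdrop'
    have key : ∀ (v : Int), (det.set i v).take (i + 1) = det.take i ++ [v] := by
      intro v
      rw [List.set_eq_take_append_cons_drop, if_pos hilt, List.take_append]
      simp [List.length_take, Nat.min_eq_left (Nat.le_of_lt hilt)]
    by_cases hc : cn.contains s
    · -- source in class_names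
      obtain ⟨k, hk⟩ : ∃ k, PySem.List.index? cn s = some k := by
        have : s ∈ cn := by simpa using hc
        rcases Option.isSome_iff_exists.mp ((PySem.List.index?_isSome_iff cn s).mpr this) with ⟨k, hk⟩
        exact ⟨k, hk⟩
      have hent : bcmB_entry (bcmB_nameIdx cn) (bcmB_synIdx (bcmB_nameIdx cn) syn) s = (k : Int) := by
        rw [bcmB_entry, bcmB_nameIdx_get, hk]; rfl
      rw [bcmA_loop]
      simp only [hc, if_true, hk, Option.getD_some]
      rw [ih (i + 1) _ _ (hset _), key]
      simp [hent, List.append_assoc, Int.toNat_natCast]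
    · -- not in class_names: synonym scan
      have hnone : (bcmB_nameIdx cn).get? s = none := by
        rw [bcmB_nameIdx_get]
        have : s ∉ cn := by simpa using hc
        rw [(PySem.List.index?_eq_none_iff cn s).mpr this]; rfl
      rw [bcmA_loop, if_neg hc]
      cases hsyn : bcmA_syn cn s syn with
      | some j =>
        dsimp only
        have hent : bcmB_entry (bcmB_nameIdx cn) (bcmB_synIdx (bcmB_nameIdx cn) syn) s = (j : Int) := by
          rw [bcmB_entry, hnone, bcmB_synIdx_get, hsyn]; rfl
        rw [ih (i + 1) _ _ (hset _), key]
        simp [hent, List.append_assoc, Int.toNat_natCast]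
      | none =>
        dsimp only
        have hent : bcmB_entry (bcmB_nameIdx cn) (bcmB_synIdx (bcmB_nameIdx cn) syn) s = -1 := by
          rw [bcmB_entry, hnone, bcmB_synIdx_get, hsyn]; rfl
        rw [ih (i + 1) _ _ hdrop']
        have htake : det.take (i + 1) = det.take i ++ [(-1 : Int)] := by
          rw [List.take_add_one, List.getElem?_eq_getElem hilt, hdet_i]; rfl
        rw [htake]
        simp [hent, List.append_assoc]

-- ===== VERDICT (by name: the statement is the Claim_ definition above) =====
theorem build_class_mapping_spec : Claim_equal_build_class_mapping := by
  intro infer cns syns _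
  unfold Spec_build_class_mapping build_class_mapping build_class_mapping_alt
  simp only []
  rw [bcmA_loop_eq _ _ infer 0 _ _ (by simp)]
  simp [List.foldl_map, bcmB_entry]
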